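-- pv_equiv track=rewrite | github.com/jonatas2014/Fundamentos_Teoricos_da_Computacao_2019_2 | Projeto prático 2/projeto_pratico_2.py | eh_correta
-- ===== SOURCE A (Python) =====
-- def pilha_in(lista, symbol):
--     lista.append(symbol)
--
-- def pilha_out(lista):
--     lista.pop()
--
-- def pilha_is_empty(lista):
--     return len(lista) == 0
--
-- def eh_casada(string):
--     pilha = []
--     for char in string:
--         # colocar cada caracter da string na pilha (empilhar) se for (,[ ou {
--         if ((char == '(') or (char == '[') or (char == '{')):
--             pilha_in(pilha, char)
--         # desempilhar se for ),] ou }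
--         if ((char == ')') or (char == ']') or (char == '}')):
--             # se for ),],} e a pilha estivar vaiza retorna FALSE
--             if pilha_is_empty(pilha):
--                 return False
--             pilha_out(pilha)
--
--     return pilha_is_empty(pilha)
--
-- def so_tem_um_simbolo(string):
--     contraparte = ""
--     simbolo = string[0]
--     if simbolo == '(':
--         contraparte = ')'
--     elif simbolo == '[':
--         contraparte = ']'
--     elif simbolo == '{':
--         contraparte = '}'
--     i = 1
--     while (i < len(string)):
--         if (string[i] != simbolo) and (string[i] != contraparte):
--             return False
--         i += 1
--     return True
--
-- def eh_correta(string):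
--     # Retirar espacos da string
--     string_sem_espacos = []
--     for char in string:
--         if char != " ":
--             string_sem_espacos.append(char)
--     # Verifica se a string tinha apenas espacos em branco
--     if len(string_sem_espacos) == 0:
--         return True
--     if so_tem_um_simbolo(string_sem_espacos):
--         return True
--     i = 0
--     while (i < len(string_sem_espacos)):
--         # nao precisa verificar ultima ou primeira posicao
--         if (i > 0) and (i < (len(string_sem_espacos) - 1)):
--             if string_sem_espacos[i] == '{':
--                 if string_sem_espacos[i - 1] != '{':
--                     # se a fatia da string anterior a { nao for casada
--                     # e nao for { garante q nao eh correta
--                     if eh_casada(string_sem_espacos[:i:]) is False: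
--                         return False
--             # se for } nao pode ter ) ou ] pela direita
--             elif string_sem_espacos[i] == '}':
--                 if string_sem_espacos[i + 1] != '}':
--                     if eh_casada(string_sem_espacos[i + 1::]) is False:
--                         return False
--             # se for [ nao pode ter somente parenteses abrindo pela esquerda
--             elif string_sem_espacos[i] == '[':
--                 if (string_sem_espacos[i - 1] != '{' and
--                         string_sem_espacos[i - 1] != '['):
--                     if eh_casada(string_sem_espacos[:i:]) is False:
--                         return False
--             # se for ] nao pode ter ) pela direita
--             elif string_sem_espacos[i] == ']':
--                 if (string_sem_espacos[i + 1] != '}' and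
--                         string_sem_espacos[i + 1] != ']'):
--                     if eh_casada(string_sem_espacos[i + 1::]) is False:
--                         return False
--
--         i += 1
--     return True
-- ===== SOURCE B (Python) =====
-- def eh_correta(string):
--     # Precompute balance-validity of every prefix and suffix in two linear
--     # scans, then one scan answers the checks A recomputes with eh_casada.
--     s = [c for c in string if c != ' ']
--     if not s:
--         return True
--     first = s[0]
--     contra = {'(': ')', '[': ']', '{': '}'}.get(first)
--     if all(c == first or (contra is not None and c == contra) for c in s[1:]):
--         return True
--     n = len(s)
--
--     def delta(c):
--         return 1 if c in '([{' else (-1 if c in ')]}' else 0)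
--
--     # prefOK[i] == eh_casada(s[:i]); built left-to-right
--     prefOK = []
--     bal = 0
--     ok = True
--     for c in s:
--         prefOK.append(ok and bal == 0)
--         bal += delta(c)
--         ok = ok and bal >= 0
--
--     # sufOK[j] == eh_casada(s[j:]); built right-to-left
--     sufOK = [True]
--     bal = 0
--     mx = 0
--     for c in reversed(s):
--         bal += delta(c)
--         mx = max(mx, bal)
--         sufOK.append(bal == 0 and mx <= 0)
--     sufOK.reverse()
--
--     def ok_at(i):
--         c = s[i]
--         if c == '{':
--             return s[i - 1] == '{' or prefOK[i]
--         if c == '}':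
--             return s[i + 1] == '}' or sufOK[i + 1]
--         if c == '[':
--             return s[i - 1] == '{' or s[i - 1] == '[' or prefOK[i]
--         if c == ']':
--             return s[i + 1] == '}' or s[i + 1] == ']' or sufOK[i + 1]
--         return True
--
--     return all(ok_at(i) for i in range(1, n - 1))
-- ===== Notes on version B (the rewrite author's own statement) =====
-- stated objective: alternative
-- what changed: A re-runs the stack-based eh_casada on a prefix or suffix at each bracket position; B precomputes prefix- and suffix-balance validity tables in two linear passes and answers every position's check by an O(1) table lookup in a single scan (it trades A's repeated rescans for two precomputation passes).
import Mathlib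
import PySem

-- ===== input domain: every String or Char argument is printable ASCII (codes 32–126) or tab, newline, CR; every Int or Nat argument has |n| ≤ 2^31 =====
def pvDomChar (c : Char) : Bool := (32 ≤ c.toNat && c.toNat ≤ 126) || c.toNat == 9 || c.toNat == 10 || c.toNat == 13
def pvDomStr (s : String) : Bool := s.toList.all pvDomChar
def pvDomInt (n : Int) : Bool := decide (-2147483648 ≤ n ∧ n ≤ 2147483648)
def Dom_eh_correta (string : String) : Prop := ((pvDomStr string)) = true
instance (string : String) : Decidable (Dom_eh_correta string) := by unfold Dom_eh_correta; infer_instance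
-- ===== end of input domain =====

-- B replaces A's repeated stack-based prefix/suffix checks by two precomputed
-- balance-validity tables and a single scan (objective: alternative algorithm).


-- ===== PORT A =====

-- eh_casada's loop; the pilha list is Python's `pilha` (append = ++ [c], pop = dropLast)
def ehCasadaAux : List Char → List Char → Bool
  | [], pilha => pilha.isEmpty
  | c :: rest, pilha =>
    let p1 := if c == '(' || c == '[' || c == '{' then pilha ++ [c] else pilha
    if c == ')' || c == ']' || c == '}' then
      if p1.isEmpty then false else ehCasadaAux rest p1.dropLast
    else ehCasadaAux rest p1

def ehCasada (s : List Char) : Bool := ehCasadaAux s []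

-- so_tem_um_simbolo's while loop (early `return False` = the `false` branch)
def soTemLoop (s : List Char) (simbolo : Char) (contraparte : Option Char) (i : Nat) : Bool :=
  if _h : i < s.length then
    if s.getD i ' ' != simbolo && !(contraparte == some (s.getD i ' ')) then false
    else soTemLoop s simbolo contraparte (i + 1)
  else true
termination_by s.length - i

-- so_tem_um_simbolo; Python's `contraparte = ""` (a string no char equals) is `none`;
-- s[0] is getD 0 ' ' — every call site guarantees s nonempty, so the default is never read
def soTem (s : List Char) : Bool :=
  let simbolo := s.getD 0 ' '
  let contraparte : Option Char :=
    if simbolo == '(' then some ')'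
    else if simbolo == '[' then some ']'
    else if simbolo == '{' then some '}'
    else none
  soTemLoop s simbolo contraparte 1

-- eh_correta's while loop; Python slices s[:i] / s[i+1:] with 0 ≤ i < len(s)
-- are exactly List.take i / List.drop (i+1); s[j] with 0 ≤ j < len(s) is getD j ' '
def ehCorretaLoop (s : List Char) (i : Nat) : Bool :=
  if _h : i < s.length then
    if 0 < i && i < s.length - 1 then
      if s.getD i ' ' == '{' then
        if s.getD (i - 1) ' ' != '{' && ehCasada (s.take i) == false then false
        else ehCorretaLoop s (i + 1)
      else if s.getD i ' ' == '}' then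
        if s.getD (i + 1) ' ' != '}' && ehCasada (s.drop (i + 1)) == false then false
        else ehCorretaLoop s (i + 1)
      else if s.getD i ' ' == '[' then
        if (s.getD (i - 1) ' ' != '{' && s.getD (i - 1) ' ' != '[') && ehCasada (s.take i) == false then false
        else ehCorretaLoop s (i + 1)
      else if s.getD i ' ' == ']' then
        if (s.getD (i + 1) ' ' != '}' && s.getD (i + 1) ' ' != ']') && ehCasada (s.drop (i + 1)) == false then false
        else ehCorretaLoop s (i + 1)
      else ehCorretaLoop s (i + 1)
    else ehCorretaLoop s (i + 1)
  else true
termination_by s.length - i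

def eh_correta (string : String) : Bool :=
  let s := string.toList.filter (fun c => c != ' ')
  if s.length == 0 then true
  else if soTem s then true
  else ehCorretaLoop s 0

-- ===== PORT B =====

-- Source B's delta(c)
def deltaC (c : Char) : Int :=
  if c == '(' || c == '[' || c == '{' then 1
  else if c == ')' || c == ']' || c == '}' then -1
  else 0

-- Source B's first loop: the flags it appends to prefOK, produced front-to-back
def prefFlags : List Char → Int → Bool → List Bool
  | [], _, _ => []
  | c :: r, bal, ok =>
    (ok && bal == 0) :: prefFlags r (bal + deltaC c) (ok && decide (0 ≤ bal + deltaC c))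

-- Source B's second loop (over reversed(s)): the flags it appends to sufOK, front-to-back
def sufFlags : List Char → Int → Int → List Bool
  | [], _, _ => []
  | c :: r, bal, mx =>
    (bal + deltaC c == 0 && decide (max mx (bal + deltaC c) ≤ 0)) ::
      sufFlags r (bal + deltaC c) (max mx (bal + deltaC c))

-- Source B's `all(c == first or ...)`; `.get` on the literal dict is PySem.Dict get?
def soTemAlt (s : List Char) : Bool :=
  let first := s.getD 0 ' '
  let contra := (PySem.Dict.ofList [('(', ')'), ('[', ']'), ('{', '}')]).get? first
  (s.drop 1).all (fun c => c == first || contra == some c)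

-- Source B's ok_at(i)
def stepB (s : List Char) (prefOK sufOK : List Bool) (i : Nat) : Bool :=
  if s.getD i ' ' == '{' then s.getD (i - 1) ' ' == '{' || prefOK.getD i false
  else if s.getD i ' ' == '}' then s.getD (i + 1) ' ' == '}' || sufOK.getD (i + 1) false
  else if s.getD i ' ' == '[' then
    s.getD (i - 1) ' ' == '{' || s.getD (i - 1) ' ' == '[' || prefOK.getD i false
  else if s.getD i ' ' == ']' then
    s.getD (i + 1) ' ' == '}' || s.getD (i + 1) ' ' == ']' || sufOK.getD (i + 1) false
  else true

-- Python's range(1, n-1) is List.range' 1 (n-2) (empty when n < 3, exactly like Python's)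
def eh_correta_alt (string : String) : Bool :=
  let s := string.toList.filter (fun c => c != ' ')
  if s.isEmpty then true
  else if soTemAlt s then true
  else
    let prefOK := prefFlags s 0 true
    let sufOK := (true :: sufFlags s.reverse 0 0).reverse
    (List.range' 1 (s.length - 2)).all (stepB s prefOK sufOK)

-- ===== PRECONDITION & SPEC =====
def Spec_eh_correta (string : String) (out : Bool) : Prop := out = eh_correta_alt string
instance (string : String) (out : Bool) : Decidable (Spec_eh_correta string out) := by unfold Spec_eh_correta; infer_instance

-- ===== CLAIM (what is proved, stated in full; the proofs are below) =====
def Claim_equal_eh_correta : Prop := ∀ (string : String), Dom_eh_correta string → Spec_eh_correta string (eh_correta string)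

-- ===== LEMMAS AND PROOFS =====

-- total bracket balance (sum of deltas)
def balL : List Char → Int
  | [] => 0
  | c :: r => deltaC c + balL r

-- stack height after running eh_casada over l from height h; none = early False
def runS : List Char → Int → Option Int
  | [], h => some h
  | c :: r, h => if h + deltaC c < 0 then none else runS r (h + deltaC c)

theorem balL_append (l m : List Char) : balL (l ++ m) = balL l + balL m := by
  induction l with
  | nil => simp [balL]
  | cons c r ih => simp [balL, ih]; ring

theorem balL_reverse (l : List Char) : balL l.reverse = balL l := by
  induction l with
  | nil => rfl
  | cons c r ih => simp [balL, List.reverse_cons, balL_append, ih]; ring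

theorem casadaAux_run (l : List Char) : ∀ pilha : List Char,
    ehCasadaAux l pilha = (runS l (pilha.length : Int) == some 0) := by
  induction l with
  | nil =>
    intro pilha
    cases pilha with
    | nil => simp [ehCasadaAux, runS]
    | cons x xs =>
      simp [ehCasadaAux, runS]
      omega
  | cons c r ih =>
    intro pilha
    by_cases ho : (c == '(' || c == '[' || c == '{') = true
    · have hc : (c == ')' || c == ']' || c == '}') = false := by
        simp only [Bool.or_eq_true, beq_iff_eq] at ho
        rcases ho with ((h | h) | h) <;> subst h <;> decide
    -- opener
      have hd : deltaC c = 1 := by simp [deltaC, ho]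
      have hnn : ¬((pilha.length : Int) + deltaC c < 0) := by rw [hd]; omega
      simp only [ehCasadaAux, runS, ho, hc, if_true, if_false, if_neg hnn, Bool.false_eq_true]
      rw [ih (pilha ++ [c])]
      congr 1
      simp [hd]
    · by_cases hc : (c == ')' || c == ']' || c == '}') = true
      · -- closer
        have hd : deltaC c = -1 := by simp [deltaC, ho, hc]
        rcases pilha with _ | ⟨x, xs⟩
        · simp only [ehCasadaAux, ho, hc, if_true, runS]
          simp [hd]
        · have hlen : 0 < (x :: xs).length := by simp
          have hnn : ¬(((x :: xs).length : Int) + deltaC c < 0) := by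
            rw [hd]; omega
          simp only [ehCasadaAux, ho, hc, if_false, if_true, Bool.false_eq_true, runS,
            if_neg hnn, List.isEmpty_cons]
          rw [ih (x :: xs).dropLast]
          have harg : ((x :: xs).dropLast.length : Int) = ((x :: xs).length : Int) + deltaC c := by
            rw [hd]
            simp only [List.length_dropLast, List.length_cons, Nat.add_sub_cancel]
            omega
          rw [harg]
      · -- neither
        have hd : deltaC c = 0 := by simp [deltaC, ho, hc]
        have hnn : ¬((pilha.length : Int) + deltaC c < 0) := by rw [hd]; omega
        simp only [ehCasadaAux, ho, hc, if_false, runS, if_neg hnn, Bool.false_eq_true]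
        rw [ih pilha]
        congr 1
        simp [hd]

theorem runS_eq (l : List Char) : ∀ h : Int,
    runS l h =
      if (∀ j, j ≤ l.length → 1 ≤ j → 0 ≤ h + balL (l.take j)) then some (h + balL l)
      else none := by
  induction l with
  | nil =>
    intro h
    have hv : (∀ j, j ≤ ([] : List Char).length → 1 ≤ j → 0 ≤ h + balL (List.take j [])) := by
      intro j hj h1
      simp at hj
      omega
    rw [if_pos hv]
    simp [runS, balL]
  | cons c r ih =>
    intro h
    by_cases hd : h + deltaC c < 0
    · rw [runS, if_pos hd, if_neg]
      push Not
      refine ⟨1, by simp, by omega, ?_⟩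
      simpa [balL] using hd
    · rw [runS, if_neg hd, ih (h + deltaC c)]
      have hiff : (∀ j, j ≤ r.length → 1 ≤ j → 0 ≤ h + deltaC c + balL (r.take j)) ↔
          (∀ j, j ≤ (c :: r).length → 1 ≤ j → 0 ≤ h + balL ((c :: r).take j)) := by
        constructor
        · intro hcond j hj h1
          match j, h1 with
          | 1, _ =>
            simp only [List.take_succ_cons, List.take_zero, balL]
            omega
          | (j' + 2), _ =>
            have := hcond (j' + 1) (by simpa using hj) (by omega)
            simp only [List.take_succ_cons, balL]
            omega
        · intro hcond j hj h1
          have := hcond (j + 1) (by simpa using hj) (by omega)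
          simp only [List.take_succ_cons, balL] at this
          omega
      by_cases hA : ∀ j, j ≤ r.length → 1 ≤ j → 0 ≤ h + deltaC c + balL (r.take j)
      · rw [if_pos hA, if_pos (hiff.mp hA)]
        simp [balL]
        ring
      · rw [if_neg hA, if_neg (fun hB => hA (hiff.mpr hB))]

theorem prefFlags_false (l : List Char) : ∀ b : Int,
    prefFlags l b false = List.replicate l.length false := by
  induction l with
  | nil => intro b; rfl
  | cons c r ih => intro b; simp [prefFlags, ih, List.replicate_succ]

theorem prefFlags_get (l : List Char) : ∀ (b : Int) (i : Nat), i < l.length →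
    (prefFlags l b true).getD i false = (runS (l.take i) b == some 0) := by
  induction l with
  | nil => intro b i hi; simp at hi
  | cons c r ih =>
    intro b i hi
    match i with
    | 0 => simp [prefFlags, runS]
    | i' + 1 =>
      simp only [prefFlags, Bool.true_and, List.getD_cons_succ, List.take_succ_cons, runS]
      by_cases h0 : 0 ≤ b + deltaC c
      · rw [decide_eq_true h0, ih (b + deltaC c) i' (by simpa using hi), if_neg (by omega)]
      · rw [decide_eq_false h0, prefFlags_false, if_pos (by omega)]
        simp [List.getD_eq_getElem?_getD]

theorem sufFlags_length (l : List Char) : ∀ b mx, (sufFlags l b mx).length = l.length := by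
  induction l with
  | nil => intro b mx; rfl
  | cons c r ih => intro b mx; simp [sufFlags, ih]

theorem sufFlags_get (l : List Char) : ∀ (b mx : Int) (k : Nat), k < l.length →
    (sufFlags l b mx).getD k false =
      decide (b + balL (l.take (k + 1)) = 0 ∧ mx ≤ 0 ∧
        ∀ m, m ≤ k + 1 → 1 ≤ m → b + balL (l.take m) ≤ 0) := by
  induction l with
  | nil => intro b mx k hk; simp at hk
  | cons c r ih =>
    intro b mx k hk
    match k with
    | 0 =>
      simp only [sufFlags, List.getD_cons_zero, List.take_succ_cons, List.take_zero, balL]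
      rw [Bool.eq_iff_iff]
      simp only [Bool.and_eq_true, decide_eq_true_eq, beq_iff_eq, max_le_iff]
      constructor
      · rintro ⟨h1, h2, h3⟩
        refine ⟨by omega, h2, ?_⟩
        intro m hm h1'
        have : m = 1 := by omega
        subst this
        simp only [List.take_succ_cons, List.take_zero, balL]
        omega
      · rintro ⟨h1, h2, h3⟩
        have := h3 1 (by omega) (by omega)
        simp only [List.take_succ_cons, List.take_zero, balL] at this
        exact ⟨by omega, h2, by omega⟩
    | k' + 1 =>
      simp only [sufFlags, List.getD_cons_succ]
      rw [ih (b + deltaC c) (max mx (b + deltaC c)) k' (by simpa using hk)]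
      rw [Bool.eq_iff_iff]
      simp only [decide_eq_true_eq, max_le_iff, List.take_succ_cons, balL]
      constructor
      · rintro ⟨h1, ⟨h2a, h2b⟩, h3⟩
        refine ⟨by omega, h2a, ?_⟩
        intro m hm h1'
        match m, h1' with
        | 1, _ =>
          simp only [List.take_succ_cons, List.take_zero, balL]
          omega
        | m' + 2, _ =>
          have := h3 (m' + 1) (by omega) (by omega)
          simp only [List.take_succ_cons, balL]
          omega
      · rintro ⟨h1, h2, h3⟩
        have hb := h3 1 (by omega) (by omega)
        simp only [List.take_succ_cons, List.take_zero, balL] at hb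
        refine ⟨by omega, ⟨h2, by omega⟩, ?_⟩
        intro m hm h1'
        have := h3 (m + 1) (by omega) (by omega)
        simp only [List.take_succ_cons, balL] at this
        omega

theorem suf_bridge (s : List Char) (j : Nat) (hj : j ≤ s.length) :
    ((true :: sufFlags s.reverse 0 0).reverse).getD j false = ehCasada (s.drop j) := by
  have hlenL : (true :: sufFlags s.reverse 0 0).length = s.length + 1 := by
    simp [sufFlags_length]
  have hrev : ((true :: sufFlags s.reverse 0 0).reverse).getD j false
      = (true :: sufFlags s.reverse 0 0).getD (s.length - j) false := by
    have hj1 : j < ((true :: sufFlags s.reverse 0 0).reverse).length := by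
      simp only [List.length_reverse, hlenL]; omega
    rw [List.getD_eq_getElem _ _ hj1, List.getElem_reverse,
        List.getD_eq_getElem _ _ (by simp only [hlenL] at hj1 ⊢; omega)]
    congr 1
    simp only [hlenL]
    omega
  rw [hrev]
  have hcasada : ehCasada (s.drop j)
      = ((if (∀ p, p ≤ (s.drop j).length → 1 ≤ p → 0 ≤ balL ((s.drop j).take p))
          then some (balL (s.drop j)) else none) == some 0) := by
    rw [ehCasada, casadaAux_run _ [], runS_eq]
    simp
  by_cases hjn : j = s.length
  · subst hjn
    simp only [Nat.sub_self, List.getD_cons_zero, List.drop_length]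
    rfl
  · have hjlt : j < s.length := by omega
    obtain ⟨k, hk⟩ : ∃ k, s.length - j = k + 1 := ⟨s.length - j - 1, by omega⟩
    rw [hk, List.getD_cons_succ]
    rw [sufFlags_get _ _ _ k (by simp only [List.length_reverse]; omega)]
    -- facts
    have hrt : ∀ m, balL (s.reverse.take m) = balL (s.drop (s.length - m)) := by
      intro m
      rw [List.take_reverse, balL_reverse]
    have hsplit : ∀ p, balL ((s.drop j).take p) = balL (s.drop j) - balL (s.drop (p + j)) := by
      intro p
      have h1 : (s.drop j).take p ++ (s.drop j).drop p = s.drop j := List.take_append_drop _ _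
      have h1' : (s.drop j).drop p = s.drop (p + j) := by rw [List.drop_drop, Nat.add_comm]
      have h2 := balL_append ((s.drop j).take p) ((s.drop j).drop p)
      rw [h1, h1'] at h2
      omega
    have hdn : balL (s.drop s.length) = 0 := by simp [List.drop_length, balL]
    have hlend : (s.drop j).length = s.length - j := by simp
    rw [hcasada, Bool.eq_iff_iff]
    by_cases hC : (∀ p, p ≤ (s.drop j).length → 1 ≤ p → 0 ≤ balL ((s.drop j).take p))
    · rw [if_pos hC]
      simp only [decide_eq_true_eq, beq_iff_eq, Option.some.injEq]
      constructor
      · rintro ⟨h1, _, _⟩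
        rw [hrt (k + 1)] at h1
        have he : s.length - (k + 1) = j := by omega
        rw [he] at h1
        omega
      · intro hv
        refine ⟨?_, le_refl 0, ?_⟩
        · rw [hrt (k + 1)]
          have he : s.length - (k + 1) = j := by omega
          rw [he]
          omega
        · intro m hm h1
          rw [hrt m]
          by_cases hm0 : m = k + 1
          · subst hm0
            have he : s.length - (k + 1) = j := by omega
            rw [he]
            omega
          · have hp1 : 1 ≤ s.length - m - j := by omega
            have := hC (s.length - m - j) (by omega) hp1
            rw [hsplit] at this
            have he : s.length - m - j + j = s.length - m := by omega
            rw [he] at this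
            omega
    · rw [if_neg hC]
      simp only [decide_eq_true_eq]
      constructor
      · rintro ⟨h1, _, h3⟩
        exfalso
        apply hC
        intro p hp hp1
        rw [hsplit p]
        rw [hrt (k + 1)] at h1
        have he : s.length - (k + 1) = j := by omega
        rw [he] at h1
        by_cases hpk : p = k + 1
        · subst hpk
          have he2 : k + 1 + j = s.length := by omega
          rw [he2, hdn]
          omega
        · have h1m : 1 ≤ s.length - (p + j) := by omega
          have := h3 (s.length - (p + j)) (by omega) h1m
          rw [hrt] at this
          have he2 : s.length - (s.length - (p + j)) = p + j := by omega
          rw [he2] at this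
          omega
      · intro hfalse
        exact absurd hfalse (by simp)

def stepA (s : List Char) (i : Nat) : Bool :=
  if 0 < i && i < s.length - 1 then
    if s.getD i ' ' == '{' then
      !(s.getD (i - 1) ' ' != '{' && ehCasada (s.take i) == false)
    else if s.getD i ' ' == '}' then
      !(s.getD (i + 1) ' ' != '}' && ehCasada (s.drop (i + 1)) == false)
    else if s.getD i ' ' == '[' then
      !((s.getD (i - 1) ' ' != '{' && s.getD (i - 1) ' ' != '[') && ehCasada (s.take i) == false)
    else if s.getD i ' ' == ']' then
      !((s.getD (i + 1) ' ' != '}' && s.getD (i + 1) ' ' != ']') && ehCasada (s.drop (i + 1)) == false)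
    else true
  else true

theorem ite_false_eq (b L : Bool) : (if b = true then false else L) = (!b && L) := by
  cases b <;> simp

theorem soTemLoop_all (s : List Char) (sim : Char) (con : Option Char) : ∀ i,
    soTemLoop s sim con i = (s.drop i).all (fun c => c == sim || con == some c) := by
  intro i
  induction hfuel : s.length - i using Nat.strong_induction_on generalizing i with
  | _ fuel ih =>
    rw [soTemLoop]
    by_cases hi : i < s.length
    · rw [dif_pos hi]
      rw [List.drop_eq_getElem_cons hi]
      rw [List.all_cons]
      rw [ite_false_eq]
      rw [ih (s.length - (i + 1)) (by omega) (i + 1) rfl]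
      congr 1
      rw [List.getD_eq_getElem _ _ hi]
      cases h1 : (s[i] == sim) <;> cases h2 : (con == some s[i]) <;> simp_all
    · rw [dif_neg hi]
      rw [List.drop_eq_nil_of_le (by omega)]
      simp
theorem soTem_eq (s : List Char) : soTem s = soTemAlt s := by
  unfold soTem soTemAlt
  rw [soTemLoop_all]
  have hcontra : (if (s.getD 0 ' ' == '(') = true then some ')'
      else if (s.getD 0 ' ' == '[') = true then some ']'
      else if (s.getD 0 ' ' == '{') = true then some '}' else none)
      = (PySem.Dict.ofList [('(', ')'), ('[', ']'), ('{', '}')]).get? (s.getD 0 ' ') := by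
    by_cases h1 : (s.getD 0 ' ' == '(') = true
    · simp only [beq_iff_eq] at h1
      rw [h1]
      decide
    · by_cases h2 : (s.getD 0 ' ' == '[') = true
      · simp only [beq_iff_eq] at h2
        rw [h2]
        decide
      · by_cases h3 : (s.getD 0 ' ' == '{') = true
        · simp only [beq_iff_eq] at h3
          rw [h3]
          decide
        · rw [if_neg h1, if_neg h2, if_neg h3]
          simp only [beq_iff_eq] at h1 h2 h3
          simp [PySem.Dict.ofList, PySem.Dict.get?]
          have hit : (PySem.Dict.empty.update [('(', ')'), ('[', ']'), ('{', '}')] :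
              PySem.Dict Char Char).items = [('(', ')'), ('[', ']'), ('{', '}')] := by decide
          intro a b hab
          rw [hit] at hab
          simp at hab
          simp only [← List.getD_eq_getElem?_getD] at hab ⊢
          rcases hab with ⟨ha, _⟩ | ⟨ha, _⟩ | ⟨ha, _⟩ <;> subst ha
          · exact fun he => h1 he.symm
          · exact fun he => h2 he.symm
          · exact fun he => h3 he.symm
  rw [hcontra]

theorem loop_all (s : List Char) : ∀ i,
    ehCorretaLoop s i = (List.range' i (s.length - i)).all (stepA s) := by
  intro i
  induction hfuel : s.length - i using Nat.strong_induction_on generalizing i with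
  | _ fuel ih =>
    rw [← hfuel, ehCorretaLoop]
    by_cases hi : i < s.length
    · rw [dif_pos hi]
      have hrange : List.range' i (s.length - i) = i :: List.range' (i + 1) (s.length - (i + 1)) := by
        have : s.length - i = (s.length - (i + 1)) + 1 := by omega
        rw [this, List.range'_succ]
      rw [hrange, List.all_cons]
      have hrec := ih (s.length - (i + 1)) (by omega) (i + 1) rfl
      unfold stepA
      by_cases hg : (0 < i && i < s.length - 1) = true
      · rw [if_pos hg, if_pos hg]
        by_cases h1 : (s.getD i ' ' == '{') = true
        · rw [if_pos h1, if_pos h1, ite_false_eq, hrec]; rfl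
        · rw [if_neg h1, if_neg h1]
          by_cases h2 : (s.getD i ' ' == '}') = true
          · rw [if_pos h2, if_pos h2, ite_false_eq, hrec]; rfl
          · rw [if_neg h2, if_neg h2]
            by_cases h3 : (s.getD i ' ' == '[') = true
            · rw [if_pos h3, if_pos h3, ite_false_eq, hrec]; rfl
            · rw [if_neg h3, if_neg h3]
              by_cases h4 : (s.getD i ' ' == ']') = true
              · rw [if_pos h4, if_pos h4, ite_false_eq, hrec]; rfl
              · rw [if_neg h4, if_neg h4, hrec]
                simp only [Bool.true_and]
                rfl
      · rw [if_neg hg, if_neg hg, hrec]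
        simp only [Bool.true_and]
        rfl
    · rw [dif_neg hi]
      rw [Nat.sub_eq_zero_of_le (by omega)]
      simp

theorem pref_bridge (s : List Char) (i : Nat) (h : i < s.length) :
    (prefFlags s 0 true).getD i false = ehCasada (s.take i) := by
  rw [prefFlags_get s 0 i h]
  unfold ehCasada
  rw [casadaAux_run _ []]
  norm_num

theorem notbad (x y : Char) (b : Bool) : (!((x != y) && (b == false))) = ((x == y) || b) := by
  cases hxy : (x == y) <;> cases b <;> simp [bne, hxy]

theorem notbad2 (x y z : Char) (b : Bool) :
    (!(((x != y) && (x != z)) && (b == false))) = (x == y || x == z || b) := by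
  cases hxy : (x == y) <;> cases hxz : (x == z) <;> cases b <;> simp [bne, hxy, hxz]

theorem step_eq (s : List Char) (i : Nat) (h1 : 1 ≤ i) (h2 : i < s.length - 1) :
    stepA s i = stepB s (prefFlags s 0 true) ((true :: sufFlags s.reverse 0 0).reverse) i := by
  unfold stepA stepB
  rw [if_pos (by simp; omega)]
  rw [pref_bridge s i (by omega), suf_bridge s (i + 1) (by omega)]
  rw [notbad, notbad, notbad2, notbad2]

theorem stepA_zero (s : List Char) : stepA s 0 = true := by
  unfold stepA
  rw [if_neg (by simp)]

theorem stepA_last (s : List Char) : stepA s (s.length - 1) = true := by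
  unfold stepA
  rw [if_neg (by simp)]

theorem all_congr' {α : Type} (l : List α) (f g : α → Bool)
    (h : ∀ x ∈ l, f x = g x) : l.all f = l.all g := by
  induction l with
  | nil => rfl
  | cons a t ih =>
    simp only [List.all_cons, h a (by simp), ih (fun x hx => h x (by simp [hx]))]

theorem main_list (s : List Char) :
    (if s.length == 0 then true else if soTem s then true else ehCorretaLoop s 0)
      = (if s.isEmpty then true else if soTemAlt s then true else
          (List.range' 1 (s.length - 2)).all
            (stepB s (prefFlags s 0 true) ((true :: sufFlags s.reverse 0 0).reverse))) := by
  by_cases hemp : s = []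
  · subst hemp
    rfl
  · rw [if_neg (show ¬((s.length == 0) = true) by simp [hemp]),
        if_neg (show ¬(s.isEmpty = true) by simp [hemp]), soTem_eq]
    by_cases hso : soTemAlt s = true
    · rw [if_pos hso, if_pos hso]
    · rw [if_neg hso, if_neg hso]
      have hpos : 0 < s.length := List.length_pos_of_ne_nil hemp
      have hlen2 : 2 ≤ s.length := by
        by_contra hlt
        apply hso
        unfold soTemAlt
        rw [List.drop_eq_nil_of_le (by omega)]
        rfl
      rw [loop_all s 0, Nat.sub_zero]
      have hsplit0 : List.range' 0 s.length = 0 :: List.range' 1 (s.length - 1) := by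
        conv_lhs => rw [show s.length = (s.length - 1) + 1 by omega]
        rw [List.range'_succ]
      have hsplit1 : List.range' 1 (s.length - 1)
          = List.range' 1 (s.length - 2) ++ [s.length - 1] := by
        conv_lhs => rw [show s.length - 1 = (s.length - 2) + 1 by omega]
        rw [List.range'_1_concat]
        congr 2
        omega
      rw [hsplit0, List.all_cons, stepA_zero, Bool.true_and, hsplit1, List.all_append]
      have hone : List.all [s.length - 1] (stepA s) = true := by
        simp [stepA_last s]
      rw [hone, Bool.and_true]
      apply all_congr'
      intro x hx
      rw [List.mem_range'] at hx
      exact step_eq s x (by omega) (by omega)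

theorem main_eq (string : String) : eh_correta string = eh_correta_alt string := by
  unfold eh_correta eh_correta_alt
  exact main_list (string.toList.filter (fun c => c != ' '))

-- ===== VERDICT (by name: the statement is the Claim_ definition above) =====
theorem eh_correta_spec : Claim_equal_eh_correta := by
  intro string _
  unfold Spec_eh_correta
  exact main_eq string
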